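-- pv_equiv track=rewrite | github.com/fxrcode/LeetPy | Leet/CF_Rectangles_and_Sqaure.py | search
-- ===== SOURCE A (Python) =====
-- def search(sqr, rect):
--     # return ALL cord of left-up cornor to put the rect, if not found, return []
--     def all_0(sqr, r, c, r_end, c_end):
--         for i in range(r, r_end + 1):
--             for j in range(c, c_end + 1):
--                 if sqr[i][j] != 0:
--                     return False
--         return True
--
--     res = []
--     S = len(sqr)
--     rec_r, rec_c = rect
--     for r in range(S):
--         for c in range(S):
--             r_end = r + rec_r - 1
--             c_end = c + rec_c - 1
--             if r_end < S and c_end < S and all_0(sqr, r, c, r_end, c_end):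
--                 res.append((r, c))
--     return res
-- ===== SOURCE B (Python) =====
-- def search(sqr, rect):
--     # Prefix-sum approach: build a 2D table of nonzero counts once, then decide
--     # each placement with a four-term O(1) query instead of rescanning the rectangle.
--     S = len(sqr)
--     rec_r, rec_c = rect
--
--     def rowpref(row):
--         pref = [0]
--         s = 0
--         for x in row:
--             if x != 0:
--                 s += 1
--             pref.append(s)
--         return pref
--
--     prev = [0] * (S + 1)
--     P = [prev]
--     for row in sqr:
--         prev = [a + b for a, b in zip(prev, rowpref(row))]
--         P.append(prev)
--
--     res = []
--     for r in range(S):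
--         for c in range(S):
--             if r + rec_r <= S and c + rec_c <= S and (
--                 P[r + rec_r][c + rec_c] - P[r][c + rec_c]
--                 - P[r + rec_r][c] + P[r][c] == 0
--             ):
--                 res.append((r, c))
--     return res
-- ===== Notes on version B (the rewrite author's own statement) =====
-- stated objective: alternative
-- what changed: Replaces the per-placement nested rescan of the rectangle with a 2D prefix-sum table of nonzero counts built once, each placement then decided by a four-term O(1) table query; when the rectangle engages the grid (neither dimension exceeds S), Pre_ excludes negative rectangle dimensions (a degenerate corner on which A's empty scan accepts every cell while B's table queries index negatively, wrapping or raising) and ragged grids (A usually raises IndexError there and B's truncated table raises or is meaningless).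
-- outside the precondition, e.g. on search([[1]], (-1, 1)): A returns [(0, 0)], B returns []; on search([[1]], (-5, 1)): A returns [(0, 0)], B raises IndexError; on search([[1, 1], [1]], (2, 1)): A returns [], B raises IndexError
import Mathlib
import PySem

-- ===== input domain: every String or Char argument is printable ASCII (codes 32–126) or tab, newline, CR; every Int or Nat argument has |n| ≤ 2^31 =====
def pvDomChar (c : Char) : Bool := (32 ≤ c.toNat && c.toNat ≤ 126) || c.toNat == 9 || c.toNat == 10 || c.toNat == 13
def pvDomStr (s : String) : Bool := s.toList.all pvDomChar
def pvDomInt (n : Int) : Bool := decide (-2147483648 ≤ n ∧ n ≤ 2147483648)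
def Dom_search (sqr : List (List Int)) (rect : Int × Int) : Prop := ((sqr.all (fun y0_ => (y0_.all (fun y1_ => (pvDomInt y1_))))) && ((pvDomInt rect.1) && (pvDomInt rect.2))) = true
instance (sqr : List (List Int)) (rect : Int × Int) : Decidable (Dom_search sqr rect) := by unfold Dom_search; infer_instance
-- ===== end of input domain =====

-- B replaces A's per-placement rescan of the whole rectangle by a 2D prefix-sum
-- table of nonzero counts built once; each placement is then decided by a
-- four-term table query (alternative algorithm; return value proved equal on Pre_).

-- ===== PORT A =====
-- helper all_0: scans the rectangle [r,r_end] x [c,c_end] for a nonzero entry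
def pyAll0 (sqr : List (List Int)) (r c rEnd cEnd : Int) : Bool :=
  (PySem.List.pyRange r (rEnd + 1) 1).all (fun i =>
    (PySem.List.pyRange c (cEnd + 1) 1).all (fun j =>
      PySem.List.pyGetD (PySem.List.pyGetD sqr i []) j 0 == 0))

def search (sqr : List (List Int)) (rect : Int × Int) : List (Int × Int) :=
  let S : Int := PySem.List.len sqr
  let recr := rect.1
  let recc := rect.2
  (PySem.List.pyRange 0 S 1).foldl (fun res r =>
    (PySem.List.pyRange 0 S 1).foldl (fun res c =>
      let rEnd := r + recr - 1
      let cEnd := c + recc - 1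
      if rEnd < S ∧ cEnd < S ∧ pyAll0 sqr r c rEnd cEnd = true then res ++ [(r, c)]
      else res) res) []

-- ===== PORT B =====
-- rowpref(row): 1D prefix counts of nonzero entries of one row
def rowPref (row : List Int) : List Int :=
  (row.foldl (fun (ps : List Int × Int) x =>
    let s' := if x ≠ 0 then ps.2 + 1 else ps.2
    (ps.1 ++ [s'], s')) ([0], 0)).1

-- the 2D prefix table P (list of S+1 rows of length S+1)
def buildP (sqr : List (List Int)) : List (List Int) :=
  let init : List Int := List.replicate (sqr.length + 1) 0
  (sqr.foldl (fun (Pp : List (List Int) × List Int) row =>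
    let cur := List.zipWith (· + ·) Pp.2 (rowPref row)
    (Pp.1 ++ [cur], cur)) ([init], init)).1

def search_alt (sqr : List (List Int)) (rect : Int × Int) : List (Int × Int) :=
  let S : Int := PySem.List.len sqr
  let rr := rect.1
  let rc := rect.2
  let P := buildP sqr
  (PySem.List.pyRange 0 S 1).foldl (fun res r =>
    (PySem.List.pyRange 0 S 1).foldl (fun res c =>
      if r + rr ≤ S ∧ c + rc ≤ S ∧
          PySem.List.pyGetD (PySem.List.pyGetD P (r + rr) []) (c + rc) 0
            - PySem.List.pyGetD (PySem.List.pyGetD P r []) (c + rc) 0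
            - PySem.List.pyGetD (PySem.List.pyGetD P (r + rr) []) c 0
            + PySem.List.pyGetD (PySem.List.pyGetD P r []) c 0 = 0
      then res ++ [(r, c)] else res) res) []

-- ===== PRECONDITION & SPEC =====
-- When the rectangle actually engages the grid (neither dimension exceeds S), Pre_ excludes
-- negative rectangle dimensions — a degenerate corner on which A's empty-range scan accepts
-- every cell while B's table queries index the table negatively (wrapping or raising
-- IndexError) — and ragged grids, on which A usually raises IndexError (returning only when
-- earlier nonzero entries stop each scan first) and B's truncated prefix table raises or is
-- meaningless.
def Pre_search (sqr : List (List Int)) (rect : Int × Int) : Prop :=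
  (sqr.length : Int) < rect.1 ∨ (sqr.length : Int) < rect.2 ∨
    ((∀ row ∈ sqr, sqr.length ≤ row.length) ∧ 0 ≤ rect.1 ∧ 0 ≤ rect.2)
instance (sqr : List (List Int)) (rect : Int × Int) : Decidable (Pre_search sqr rect) := by
  unfold Pre_search; infer_instance

def pvWitness_search : List (List Int) × (Int × Int) := ([[0, 1], [0, 0]], (1, 2))

def Spec_search (sqr : List (List Int)) (rect : Int × Int) (out : List (Int × Int)) : Prop :=
  out = search_alt sqr rect
instance (sqr : List (List Int)) (rect : Int × Int) (out : List (Int × Int)) : Decidable (Spec_search sqr rect out) := by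
  unfold Spec_search; infer_instance

-- ===== CLAIM (what is proved, stated in full; the proofs are below) =====
def Claim_equal_search : Prop := ∀ (sqr : List (List Int)) (rect : Int × Int), Dom_search sqr rect → Pre_search sqr rect → Spec_search sqr rect (search sqr rect)

-- ===== LEMMAS AND PROOFS =====

-- nzc row j = number of nonzero entries among the first j entries of row, as an Int
def nzc (row : List Int) (j : Nat) : Int :=
  ((row.take j).countP (fun x => decide (x ≠ 0)) : Int)

-- Fr sqr i j = number of nonzero entries in the first i rows, first j columns
def Fr (sqr : List (List Int)) (i j : Nat) : Int :=
  ((sqr.take i).map (fun row => nzc row j)).sum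

theorem nzc_zero (row : List Int) : nzc row 0 = 0 := by simp [nzc]

theorem nzc_cons_succ (x : Int) (xs : List Int) (k : Nat) :
    nzc (x :: xs) (k + 1) = (if x ≠ 0 then 1 else 0) + nzc xs k := by
  rcases eq_or_ne x 0 with h | h
  · simp [nzc, List.take_succ_cons, h]
  · simp [nzc, List.take_succ_cons, h]
    omega

theorem Fr_zero (sqr : List (List Int)) (j : Nat) : Fr sqr 0 j = 0 := by simp [Fr]

theorem Fr_cons_succ (row : List Int) (rest : List (List Int)) (i j : Nat) :
    Fr (row :: rest) (i + 1) j = nzc row j + Fr rest i j := by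
  simp [Fr, List.take_succ_cons]

theorem rowPref_foldl_aux (row : List Int) (pref : List Int) (s : Int) :
    row.foldl (fun (ps : List Int × Int) x =>
      let s' := if x ≠ 0 then ps.2 + 1 else ps.2
      (ps.1 ++ [s'], s')) (pref, s)
    = (pref ++ (List.range row.length).map (fun k => s + nzc row (k + 1)),
       s + nzc row row.length) := by
  induction row generalizing pref s with
  | nil => simp [nzc]
  | cons x xs ih =>
    simp only [List.foldl_cons]
    rw [ih]
    rw [List.length_cons, List.range_succ_eq_map]
    simp only [List.map_cons, List.map_map, Prod.mk.injEq]
    refine ⟨?_, ?_⟩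
    · rw [List.append_assoc, List.singleton_append]
      congr 1
      congr 1
      · rw [nzc_cons_succ, nzc_zero]
        split_ifs <;> ring
      · refine List.map_congr_left ?_
        intro k _
        simp only [Function.comp_apply]
        rw [nzc_cons_succ]
        split_ifs <;> ring
    · rw [nzc_cons_succ]
      split_ifs <;> ring

theorem rowPref_eq (row : List Int) :
    rowPref row = (List.range (row.length + 1)).map (fun j => nzc row j) := by
  unfold rowPref
  rw [rowPref_foldl_aux]
  rw [List.range_succ_eq_map]
  simp [nzc_zero, List.map_map, Function.comp]

theorem zipWith_map_range (S L : Nat) (h : S ≤ L) (f h' : Nat → Int) :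
    List.zipWith (· + ·) ((List.range (S + 1)).map f) ((List.range (L + 1)).map h')
      = (List.range (S + 1)).map (fun j => f j + h' j) := by
  apply List.ext_getElem
  · simp; omega
  · intro k h1 h2
    simp

theorem buildP_foldl_aux (rs : List (List Int)) (S : Nat)
    (h : ∀ row ∈ rs, S ≤ row.length) (f : Nat → Int) (P : List (List Int)) :
    rs.foldl (fun (Pp : List (List Int) × List Int) row =>
      let cur := List.zipWith (· + ·) Pp.2 (rowPref row)
      (Pp.1 ++ [cur], cur)) (P, (List.range (S + 1)).map f)
    = (P ++ (List.range rs.length).map (fun i =>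
          (List.range (S + 1)).map (fun j => f j + Fr rs (i + 1) j)),
       (List.range (S + 1)).map (fun j => f j + Fr rs rs.length j)) := by
  induction rs generalizing f P with
  | nil => simp [Fr_zero]
  | cons row rest ih =>
    simp only [List.foldl_cons]
    have hrow : S ≤ row.length := h row (List.mem_cons_self ..)
    have hcur : List.zipWith (· + ·) ((List.range (S + 1)).map f) (rowPref row)
        = (List.range (S + 1)).map (fun j => f j + nzc row j) := by
      rw [rowPref_eq]
      obtain ⟨L, hL, hSL⟩ : ∃ L, row.length = L ∧ S ≤ L := ⟨row.length, rfl, hrow⟩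
      rw [hL]
      exact zipWith_map_range S L hSL f (fun j => nzc row j)
    rw [hcur]
    rw [ih (fun r hr => h r (List.mem_cons_of_mem _ hr)) (fun j => f j + nzc row j) (P ++ [_])]
    simp only [Prod.mk.injEq]
    refine ⟨?_, ?_⟩
    · rw [List.append_assoc, List.singleton_append]
      congr 1
      apply List.ext_getElem
      · simp [List.length_cons]
      · intro k hk1 hk2
        cases k with
        | zero =>
          simp only [List.getElem_cons_zero, List.getElem_map, List.getElem_range]
          refine List.map_congr_left ?_
          intro j _
          rw [Fr_cons_succ, Fr_zero]
          ring
        | succ k =>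
          simp only [List.getElem_cons_succ, List.getElem_map, List.getElem_range]
          refine List.map_congr_left ?_
          intro j _
          rw [Fr_cons_succ]
          ring
    · refine List.map_congr_left ?_
      intro j _
      rw [List.length_cons, Fr_cons_succ]
      ring

theorem buildP_eq (sqr : List (List Int)) (hpre : ∀ row ∈ sqr, sqr.length ≤ row.length) :
    buildP sqr = (List.range (sqr.length + 1)).map (fun i =>
      (List.range (sqr.length + 1)).map (fun j => Fr sqr i j)) := by
  unfold buildP
  have hinit : List.replicate (sqr.length + 1) (0 : Int)
      = (List.range (sqr.length + 1)).map (fun _ => (0 : Int)) := by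
    rw [List.map_const']
    simp
  simp only [hinit]
  rw [buildP_foldl_aux sqr sqr.length hpre (fun _ => 0) _]
  rw [List.singleton_append]
  apply List.ext_getElem
  · simp
  · intro k hk1 hk2
    cases k with
    | zero =>
      simp only [List.getElem_cons_zero, List.getElem_map, List.getElem_range]
      refine List.map_congr_left ?_
      intro j _
      rw [Fr_zero]
    | succ k =>
      simp only [List.getElem_cons_succ, List.getElem_map, List.getElem_range]
      refine List.map_congr_left ?_
      intro j _
      ring

theorem P_lookup (sqr : List (List Int)) (hpre : ∀ row ∈ sqr, sqr.length ≤ row.length)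
    (i j : Nat) (hi : i ≤ sqr.length) (hj : j ≤ sqr.length) :
    PySem.List.pyGetD (PySem.List.pyGetD (buildP sqr) (i : Int) []) (j : Int) 0
      = Fr sqr i j := by
  rw [buildP_eq sqr hpre]
  rw [PySem.List.pyGetD_natCast, PySem.List.pyGetD_natCast]
  have h1 : ((List.range (sqr.length + 1)).map (fun i =>
        (List.range (sqr.length + 1)).map (fun j => Fr sqr i j))).getD i []
      = (List.range (sqr.length + 1)).map (fun j => Fr sqr i j) := by
    rw [List.getD_eq_getElem _ _ (by simp; omega)]
    simp
  rw [h1]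
  rw [List.getD_eq_getElem _ _ (by simp; omega)]
  simp

theorem sum_map_sub {α : Type} (l : List α) (f g : α → Int) :
    (l.map f).sum - (l.map g).sum = (l.map (fun x => f x - g x)).sum := by
  induction l with
  | nil => simp
  | cons x xs ih => simp only [List.map_cons, List.sum_cons]; omega

theorem sum_eq_zero_iff_of_nonneg (l : List Int) (h : ∀ x ∈ l, 0 ≤ x) :
    l.sum = 0 ↔ ∀ x ∈ l, x = 0 := by
  induction l with
  | nil => simp
  | cons x xs ih =>
    have hx : 0 ≤ x := h x (List.mem_cons_self ..)
    have hxs : ∀ y ∈ xs, 0 ≤ y := fun y hy => h y (List.mem_cons_of_mem _ hy)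
    have hs : 0 ≤ xs.sum := List.sum_nonneg hxs
    simp only [List.sum_cons, List.mem_cons, forall_eq_or_imp]
    rw [← ih hxs]
    omega

theorem Fr_diff (sqr : List (List Int)) (a ra j : Nat) :
    Fr sqr (a + ra) j - Fr sqr a j
      = (((sqr.drop a).take ra).map (fun row => nzc row j)).sum := by
  simp only [Fr, List.take_add, List.map_append, List.sum_append]
  ring

theorem nzc_diff (row : List Int) (b cb : Nat) :
    nzc row (b + cb) - nzc row b
      = (((row.drop b).take cb).countP (fun x => decide (x ≠ 0)) : Int) := by
  simp only [nzc, List.take_add, List.countP_append]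
  push_cast
  ring

-- membership in (l.drop a).take n, by index
theorem mem_drop_take {α : Type} (l : List α) (a n : Nat) (x : α) :
    x ∈ (l.drop a).take n ↔ ∃ k, k < n ∧ ∃ h : a + k < l.length, x = l[a + k] := by
  rw [List.mem_iff_getElem]
  have hlen : ((l.drop a).take n).length = min n (l.length - a) := by simp
  constructor
  · rintro ⟨k, hk, hx⟩
    refine ⟨k, by omega, by omega, ?_⟩
    rw [← hx, List.getElem_take, List.getElem_drop]
  · rintro ⟨k, hk, hak, hx⟩
    refine ⟨k, by omega, ?_⟩
    rw [List.getElem_take, List.getElem_drop]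
    exact hx.symm

-- the rectangle-is-all-zero predicate, via row/entry membership
def ZQ (sqr : List (List Int)) (a b ra cb : Nat) : Prop :=
  ∀ row ∈ (sqr.drop a).take ra, ∀ x ∈ (row.drop b).take cb, x = 0

theorem query_eq_zero_iff (sqr : List (List Int)) (a b ra cb : Nat) :
    (Fr sqr (a + ra) (b + cb) - Fr sqr a (b + cb) - Fr sqr (a + ra) b + Fr sqr a b = 0)
      ↔ ZQ sqr a b ra cb := by
  have hq : Fr sqr (a + ra) (b + cb) - Fr sqr a (b + cb) - Fr sqr (a + ra) b + Fr sqr a b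
      = (((sqr.drop a).take ra).map
          (fun row => (((row.drop b).take cb).countP (fun x => decide (x ≠ 0)) : Int))).sum := by
    have h1 := Fr_diff sqr a ra (b + cb)
    have h2 := Fr_diff sqr a ra b
    have h3 : Fr sqr (a + ra) (b + cb) - Fr sqr a (b + cb) - Fr sqr (a + ra) b + Fr sqr a b
        = (((sqr.drop a).take ra).map (fun row => nzc row (b + cb))).sum
          - (((sqr.drop a).take ra).map (fun row => nzc row b)).sum := by omega
    rw [h3, sum_map_sub]
    refine congrArg List.sum (List.map_congr_left ?_)
    intro row _
    exact nzc_diff row b cb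
  rw [hq]
  rw [sum_eq_zero_iff_of_nonneg _ (by
    intro x hx
    obtain ⟨row, _, hrow⟩ := List.mem_map.mp hx
    rw [← hrow]
    positivity)]
  unfold ZQ
  constructor
  · intro h row hrow x hx
    have hv := h _ (List.mem_map.mpr ⟨row, hrow, rfl⟩)
    have hc : ((row.drop b).take cb).countP (fun x => decide (x ≠ 0)) = 0 := by exact_mod_cast hv
    have := List.countP_eq_zero.mp hc x hx
    simpa using this
  · intro h x hx
    obtain ⟨row, hrow, hval⟩ := List.mem_map.mp hx
    rw [← hval]
    have hc : ((row.drop b).take cb).countP (fun x => decide (x ≠ 0)) = 0 := by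
      apply List.countP_eq_zero.mpr
      intro y hy
      simpa using h row hrow y hy
    exact_mod_cast congrArg (Nat.cast : Nat → Int) hc

theorem pyAll0_iff (sqr : List (List Int)) (a b ra cb : Nat)
    (hra : a + ra ≤ sqr.length) (hlen : ∀ row ∈ sqr, b + cb ≤ row.length) :
    (pyAll0 sqr (a : Int) (b : Int) ((a : Int) + (ra : Int) - 1) ((b : Int) + (cb : Int) - 1) = true)
      ↔ ZQ sqr a b ra cb := by
  unfold pyAll0
  have e1 : (a : Int) + (ra : Int) - 1 + 1 = ((a + ra : Nat) : Int) := by push_cast; ring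
  have e2 : (b : Int) + (cb : Int) - 1 + 1 = ((b + cb : Nat) : Int) := by push_cast; ring
  rw [e1, e2]
  simp only [List.all_eq_true, PySem.List.mem_pyRange_one, beq_iff_eq]
  constructor
  · intro h row hrow x hx
    obtain ⟨k, hk, hklen, hrowe⟩ := (mem_drop_take sqr a ra row).mp hrow
    obtain ⟨m, hm, hmlen, hxe⟩ := (mem_drop_take row b cb x).mp hx
    have hv := h ((a + k : Nat) : Int) (by constructor <;> [exact_mod_cast Nat.le_add_right a k; exact_mod_cast Nat.add_lt_add_left hk a])
      ((b + m : Nat) : Int) (by constructor <;> [exact_mod_cast Nat.le_add_right b m; exact_mod_cast Nat.add_lt_add_left hm b])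
    rw [PySem.List.pyGetD_natCast, PySem.List.pyGetD_natCast] at hv
    rw [List.getD_eq_getElem _ _ hklen] at hv
    rw [← hrowe] at hv
    rw [List.getD_eq_getElem _ _ hmlen] at hv
    rw [← hxe] at hv
    exact hv
  · intro h i hi j hj
    have hi0 : 0 ≤ i := le_trans (by exact_mod_cast Int.natCast_nonneg a) hi.1
    have hj0 : 0 ≤ j := le_trans (by exact_mod_cast Int.natCast_nonneg b) hj.1
    obtain ⟨iN, rfl⟩ : ∃ n : Nat, i = (n : Int) := ⟨i.toNat, (Int.toNat_of_nonneg hi0).symm⟩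
    obtain ⟨jN, rfl⟩ : ∃ n : Nat, j = (n : Int) := ⟨j.toNat, (Int.toNat_of_nonneg hj0).symm⟩
    have hia : a ≤ iN := by exact_mod_cast hi.1
    have hira : iN < a + ra := by exact_mod_cast hi.2
    have hjb : b ≤ jN := by exact_mod_cast hj.1
    have hjcb : jN < b + cb := by exact_mod_cast hj.2
    have hiN : iN < sqr.length := by omega
    have hrowmem : sqr[iN] ∈ (sqr.drop a).take ra := by
      refine (mem_drop_take sqr a ra _).mpr ⟨iN - a, by omega, by omega, ?_⟩
      congr 1
      omega
    have hrlen : b + cb ≤ sqr[iN].length := hlen _ (List.getElem_mem hiN)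
    have hjN : jN < sqr[iN].length := by omega
    have hxmem : sqr[iN][jN] ∈ (sqr[iN].drop b).take cb := by
      refine (mem_drop_take sqr[iN] b cb _).mpr ⟨jN - b, by omega, by omega, ?_⟩
      congr 1
      omega
    have hv := h sqr[iN] hrowmem sqr[iN][jN] hxmem
    rw [PySem.List.pyGetD_natCast, PySem.List.pyGetD_natCast]
    rw [List.getD_eq_getElem _ _ hiN, List.getD_eq_getElem _ _ hjN]
    exact hv

-- per-cell equivalence under the precondition (nonnegative dims; full rows unless the rect cannot fit)
theorem cond_iff_wide (sqr : List (List Int)) (rr rc r c : Int)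
    (hpre : (sqr.length : Int) < rr ∨ (sqr.length : Int) < rc ∨
      ((∀ row ∈ sqr, sqr.length ≤ row.length) ∧ 0 ≤ rr ∧ 0 ≤ rc))
    (hr0 : 0 ≤ r) (hrS : r < (sqr.length : Int))
    (hc0 : 0 ≤ c) (hcS : c < (sqr.length : Int)) :
    (r + rr - 1 < (sqr.length : Int) ∧ c + rc - 1 < (sqr.length : Int) ∧
        pyAll0 sqr r c (r + rr - 1) (c + rc - 1) = true)
      ↔ (r + rr ≤ (sqr.length : Int) ∧ c + rc ≤ (sqr.length : Int) ∧
          PySem.List.pyGetD (PySem.List.pyGetD (buildP sqr) (r + rr) []) (c + rc) 0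
            - PySem.List.pyGetD (PySem.List.pyGetD (buildP sqr) r []) (c + rc) 0
            - PySem.List.pyGetD (PySem.List.pyGetD (buildP sqr) (r + rr) []) c 0
            + PySem.List.pyGetD (PySem.List.pyGetD (buildP sqr) r []) c 0 = 0) := by
  rcases hpre with hbig | hbig | ⟨hfits, hrr, hrc⟩
  · exact iff_of_false (fun hx => by omega) (fun hx => by omega)
  · exact iff_of_false (fun hx => absurd hx.2.1 (by omega)) (fun hx => absurd hx.2.1 (by omega))
  have hg1 : (r + rr - 1 < (sqr.length : Int)) ↔ (r + rr ≤ (sqr.length : Int)) := by omega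
  have hg2 : (c + rc - 1 < (sqr.length : Int)) ↔ (c + rc ≤ (sqr.length : Int)) := by omega
  rw [hg1, hg2]
  refine and_congr_right fun h1 => and_congr_right fun h2 => ?_
  obtain ⟨a, rfl⟩ : ∃ n : Nat, r = (n : Int) := ⟨r.toNat, (Int.toNat_of_nonneg hr0).symm⟩
  obtain ⟨b, rfl⟩ : ∃ n : Nat, c = (n : Int) := ⟨c.toNat, (Int.toNat_of_nonneg hc0).symm⟩
  obtain ⟨ra, rfl⟩ : ∃ n : Nat, rr = (n : Int) := ⟨rr.toNat, (Int.toNat_of_nonneg hrr).symm⟩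
  obtain ⟨cb, rfl⟩ : ∃ n : Nat, rc = (n : Int) := ⟨rc.toNat, (Int.toNat_of_nonneg hrc).symm⟩
  have hara : a + ra ≤ sqr.length := by omega
  have hbcb : b + cb ≤ sqr.length := by omega
  have e1 : (a : Int) + (ra : Int) = ((a + ra : Nat) : Int) := by push_cast; ring
  have e2 : (b : Int) + (cb : Int) = ((b + cb : Nat) : Int) := by push_cast; ring
  have hcols : ∀ row ∈ sqr, b + cb ≤ row.length := fun row hrow => le_trans hbcb (hfits row hrow)
  have hAll := pyAll0_iff sqr a b ra cb hara hcols
  rw [e1, e2] at hAll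
  rw [e1, e2]
  rw [P_lookup sqr hfits (a + ra) (b + cb) hara hbcb,
      P_lookup sqr hfits a (b + cb) (by omega) hbcb,
      P_lookup sqr hfits (a + ra) b hara (by omega),
      P_lookup sqr hfits a b (by omega) (by omega)]
  exact hAll.trans (query_eq_zero_iff sqr a b ra cb).symm

-- ===== VERDICT (by name: the statement is the Claim_ definition above) =====
theorem search_spec : Claim_equal_search := by
  intro sqr rect _ hpre
  unfold Spec_search search search_alt
  simp only [PySem.List.len_eq]
  refine PySem.List.foldl_congr_mem _ _ _ _ ?_
  intro acc r hrmem
  refine PySem.List.foldl_congr_mem _ _ _ _ ?_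
  intro acc2 c hcmem
  obtain ⟨hr0, hrS⟩ := (PySem.List.mem_pyRange_one).mp hrmem
  obtain ⟨hc0, hcS⟩ := (PySem.List.mem_pyRange_one).mp hcmem
  exact if_congr (cond_iff_wide sqr rect.1 rect.2 r c hpre hr0 hrS hc0 hcS) rfl rfl
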